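-- pv_equiv track=rewrite | github.com/opencobra/optlang | optlang/interface/change_tracker.py | _iter_last
-- ===== SOURCE A (Python) =====
-- def _iter_last(iterable):
--     seen = set()
--     for pack in reversed(iterable):
--         obj = pack[0]
--         if obj in seen:
--             continue
--         yield pack
--         seen.add(obj)
--     iterable.clear()
-- ===== SOURCE B (Python) =====
-- def _iter_last(iterable):
--     # Forward pass: del-then-reinsert so each key sits at its last occurrence,
--     # then emit the values in reverse; clears iterable like the original.
--     d = {}
--     for pack in iterable:
--         k = pack[0]
--         if k in d:
--             del d[k]
--         d[k] = pack
--     yield from reversed(list(d.values()))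
--     iterable.clear()
-- ===== Notes on version B (the rewrite author's own statement) =====
-- stated objective: idiomatic
-- what changed: Replaces the reverse scan with a hand-maintained seen-set by a forward pass building an insertion-ordered dict (del-then-reinsert keeps each key at its last occurrence) followed by a reversed emit of its values.
import Mathlib
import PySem

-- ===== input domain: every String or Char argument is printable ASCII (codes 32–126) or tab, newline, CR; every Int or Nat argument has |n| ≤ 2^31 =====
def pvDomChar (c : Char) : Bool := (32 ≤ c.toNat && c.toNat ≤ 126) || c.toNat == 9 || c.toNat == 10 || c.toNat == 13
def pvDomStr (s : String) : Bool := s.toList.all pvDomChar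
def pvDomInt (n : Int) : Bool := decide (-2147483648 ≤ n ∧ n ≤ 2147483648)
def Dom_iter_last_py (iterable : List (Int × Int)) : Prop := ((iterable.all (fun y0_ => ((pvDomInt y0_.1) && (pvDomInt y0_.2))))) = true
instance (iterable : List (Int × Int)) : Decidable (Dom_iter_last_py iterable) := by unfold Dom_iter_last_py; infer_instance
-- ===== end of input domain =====

-- B replaces A's reverse scan with a seen-set by a forward ordered-dict build (del-then-reinsert)
-- plus a reversed emit of the values (idiomatic). Both Pythons clear `iterable` in place after
-- yielding; the equivalence proved here is about the sequence of yielded values only.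


-- ===== PORT A =====
-- reversed(iterable) loop with a seen set; state = (seen, yielded-so-far)
def iter_last_py (iterable : List (Int × Int)) : List (Int × Int) :=
  (iterable.reverse.foldl
    (fun (st : PySem.Set Int × List (Int × Int)) pack =>
      if st.1.contains pack.1 then st else (st.1.add pack.1, st.2 ++ [pack]))
    (PySem.Set.empty, [])).2

-- ===== PORT B =====
-- forward dict build: del-then-reinsert moves the key to the end; then reversed values
def iter_last_py_alt (iterable : List (Int × Int)) : List (Int × Int) :=
  (iterable.foldl
    (fun (d : PySem.Dict Int (Int × Int)) pack => (d.erase pack.1).insert pack.1 pack)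
    PySem.Dict.empty).values.reverse

-- ===== PRECONDITION & SPEC =====
def Spec_iter_last_py (iterable : List (Int × Int)) (out : List (Int × Int)) : Prop := out = iter_last_py_alt iterable
instance (iterable : List (Int × Int)) (out : List (Int × Int)) : Decidable (Spec_iter_last_py iterable out) := by unfold Spec_iter_last_py; infer_instance

-- ===== CLAIM (what is proved, stated in full; the proofs are below) =====
def Claim_equal_iter_last_py : Prop := ∀ (iterable : List (Int × Int)), Dom_iter_last_py iterable → Spec_iter_last_py iterable (iter_last_py iterable)

-- ===== LEMMAS AND PROOFS =====

-- A's loop as structural recursion (seen-set, kept packs)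
def gLoop : List (Int × Int) → PySem.Set Int → List (Int × Int)
  | [], _ => []
  | p :: r, s => if s.contains p.1 then gLoop r s else p :: gLoop r (s.add p.1)

-- the seen set after A's loop
def sAfter : List (Int × Int) → PySem.Set Int → PySem.Set Int
  | [], s => s
  | p :: r, s => if s.contains p.1 then sAfter r s else sAfter r (s.add p.1)

-- common specification: last-occurrence-per-key, in reverse order, by forward recursion
def lastRev : List (Int × Int) → List (Int × Int)
  | [] => []
  | x :: xs => lastRev xs ++ (if (xs.map Prod.fst).contains x.1 then [] else [x])

theorem foldlA_eq_gLoop (r : List (Int × Int)) (s : PySem.Set Int) (acc : List (Int × Int)) :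
    (r.foldl
      (fun (st : PySem.Set Int × List (Int × Int)) pack =>
        if st.1.contains pack.1 then st else (st.1.add pack.1, st.2 ++ [pack]))
      (s, acc)).2 = acc ++ gLoop r s := by
  induction r generalizing s acc with
  | nil => simp [gLoop]
  | cons p r ih =>
    simp only [List.foldl_cons, gLoop]
    by_cases h : s.contains p.1 = true
    · rw [if_pos h, if_pos h]; exact ih s acc
    · rw [if_neg h, if_neg h, ih]; simp

theorem mem_sAfter (r : List (Int × Int)) (s : PySem.Set Int) (k : Int) :
    k ∈ sAfter r s ↔ k ∈ (s : List Int) ∨ k ∈ r.map Prod.fst := by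
  induction r generalizing s with
  | nil => simp [sAfter]
  | cons p r ih =>
    simp only [sAfter, List.map_cons, List.mem_cons]
    by_cases h : p.1 ∈ (s : List Int)
    · rw [if_pos (by simp [PySem.Set.contains, List.contains_iff_mem, h]), ih]
      by_cases hk : k = p.1 <;> simp_all
    · rw [if_neg (by simp [PySem.Set.contains, List.contains_iff_mem, h]), ih]
      simp only [PySem.Set.add, PySem.Set.contains,
        if_neg (by simp [List.contains_iff_mem, h] : ¬ (List.contains s p.1 = true)),
        List.mem_append, List.mem_singleton]
      tauto

theorem gLoop_append (a b : List (Int × Int)) (s : PySem.Set Int) :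
    gLoop (a ++ b) s = gLoop a s ++ gLoop b (sAfter a s) := by
  induction a generalizing s with
  | nil => simp [gLoop, sAfter]
  | cons p a ih =>
    simp only [List.cons_append, gLoop, sAfter]
    by_cases h : p.1 ∈ (s : List Int)
    · simp [PySem.Set.contains, h, ih]
    · simp [PySem.Set.contains, h, ih]

theorem gLoop_reverse_eq_lastRev (l : List (Int × Int)) :
    gLoop l.reverse PySem.Set.empty = lastRev l := by
  induction l with
  | nil => simp [gLoop, lastRev]
  | cons x xs ih =>
    rw [List.reverse_cons, gLoop_append, ih]
    simp only [lastRev]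
    congr 1
    by_cases hx : x.1 ∈ xs.map Prod.fst <;>
      simp [gLoop, mem_sAfter, PySem.Set.empty, PySem.Set.contains, List.contains_iff_mem, hx]

theorem erase_insert_items (d : PySem.Dict Int (Int × Int)) (k : Int) (v : Int × Int) :
    ((d.erase k).insert k v).items = d.items.filter (fun p => !(p.1 == k)) ++ [(k, v)] := by
  have hc : (d.erase k).contains k = false := by
    simp [PySem.Dict.erase, PySem.Dict.contains, List.contains_iff_mem, List.mem_filter]
  simp [PySem.Dict.insert, hc, PySem.Dict.erase]

theorem dict_build_values (l : List (Int × Int)) (d : PySem.Dict Int (Int × Int)) :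
    (l.foldl
      (fun (d : PySem.Dict Int (Int × Int)) pack => (d.erase pack.1).insert pack.1 pack)
      d).values.reverse
    = lastRev l
      ++ ((d.items.filter (fun kv => !((l.map Prod.fst).contains kv.1))).map Prod.snd).reverse := by
  induction l generalizing d with
  | nil => simp [lastRev, PySem.Dict.values]
  | cons x xs ih =>
    simp only [List.foldl_cons]
    rw [ih]
    simp only [lastRev, List.map_cons]
    rw [erase_insert_items]
    rw [List.filter_append, List.map_append, List.reverse_append, List.filter_filter]
    have hpred : ∀ kv : Int × (Int × Int),
        ((!((xs.map Prod.fst).contains kv.1)) && (!(kv.1 == x.1)))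
        = (!(((x.1 :: xs.map Prod.fst) : List Int).contains kv.1)) := by
      intro kv
      by_cases h1 : kv.1 = x.1 <;> by_cases h2 : (xs.map Prod.fst).contains kv.1 = true <;>
        simp_all [List.contains_iff_mem]
    rw [List.filter_congr (fun kv _ => hpred kv)]
    by_cases h : x.1 ∈ xs.map Prod.fst <;>
      simp [List.filter, List.contains_iff_mem, h]

-- ===== VERDICT (by name: the statement is the Claim_ definition above) =====
theorem iter_last_py_spec : Claim_equal_iter_last_py := by
  intro l _
  show iter_last_py l = iter_last_py_alt l
  unfold iter_last_py iter_last_py_alt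
  rw [foldlA_eq_gLoop, dict_build_values, gLoop_reverse_eq_lastRev]
  simp [PySem.Dict.empty]
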